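-- pv_equiv track=rewrite | github.com/Deven5656/Python_DS | List/16_Split_by_char.py | split_by_char
-- ===== SOURCE A (Python) =====
-- def split_by_char(lst):
--     """
--     Description:
--         This function is used to split a list based on first character of word.
--     Parameters:
--         lst: list containing string
--     Return:
--         dict
--     """
--     result={}
--
--     for element in lst:
--         if element:
--             first_char=element[0].lower()
--             if first_char in result:
--                 result[first_char].append(element)
--             else:
--                 result[first_char]=[element]
--     return result
-- ===== SOURCE B (Python) =====
-- def split_by_char(lst):
--     """Group non-empty strings by the lowercased first character.
--
--     Two-pass alternative: first collect the distinct keys in order of first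
--     appearance, then build each group with a filter pass per key."""
--     words = [e for e in lst if e]
--     keys = list(dict.fromkeys(w[0].lower() for w in words))
--     return {k: [w for w in words if w[0].lower() == k] for k in keys}
-- ===== Notes on version B (the rewrite author's own statement) =====
-- stated objective: alternative
-- what changed: Replaces A's single-pass incremental dict building (append-or-insert per element) with a two-pass scheme: ordered dedup of the lowercased first characters, then one filter pass per key to build each group.
import Mathlib
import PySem

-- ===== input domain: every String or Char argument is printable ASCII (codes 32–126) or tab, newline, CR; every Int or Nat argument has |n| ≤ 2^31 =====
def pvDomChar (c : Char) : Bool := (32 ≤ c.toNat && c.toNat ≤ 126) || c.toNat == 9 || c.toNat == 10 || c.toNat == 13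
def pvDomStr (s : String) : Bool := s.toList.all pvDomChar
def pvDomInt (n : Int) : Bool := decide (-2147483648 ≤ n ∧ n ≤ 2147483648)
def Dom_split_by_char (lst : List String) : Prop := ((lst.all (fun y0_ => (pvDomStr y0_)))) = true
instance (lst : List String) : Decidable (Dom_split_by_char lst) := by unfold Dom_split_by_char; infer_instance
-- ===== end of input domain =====

-- B replaces A's single-pass incremental dict building by a two-pass scheme
-- (ordered dedup of keys, then a filter pass per key); same return value, no speed claim.


-- ===== PORT A =====
-- literal port of A: fold over lst, skip falsy (empty) strings, append to the
-- group if the key is already present, otherwise insert a fresh singleton group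
def split_by_char (lst : List String) : List (String × List String) :=
  (lst.foldl (fun result element =>
      match element.toList with
      | [] => result          -- `if element:` — the empty string is falsy, skipped
      | c :: _ =>
        let first_char := String.ofList [PySem.Chars.lowerChar c]   -- element[0].lower()
        if result.contains first_char then
          result.modify first_char [] (fun v => v ++ [element]) -- result[first_char].append(element)
        else
          result.insert first_char [element]                    -- result[first_char]=[element]
    ) (PySem.Dict.empty : PySem.Dict String (List String))).items

-- ===== PORT B =====
-- w[0].lower() as a one-character string (only applied to non-empty words)
def altKey (w : String) : String :=
  String.ofList ((w.toList.take 1).map PySem.Chars.lowerChar)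

def split_by_char_alt (lst : List String) : List (String × List String) :=
  let words := lst.filter (fun e => !e.toList.isEmpty)          -- [e for e in lst if e]
  let keys := PySem.List.dedup (words.map altKey)               -- list(dict.fromkeys(...))
  keys.map (fun k => (k, words.filter (fun w => altKey w == k)))

-- ===== PRECONDITION & SPEC =====
def Spec_split_by_char (lst : List String) (out : List (String × List String)) : Prop := out = split_by_char_alt lst
instance (lst : List String) (out : List (String × List String)) : Decidable (Spec_split_by_char lst out) := by unfold Spec_split_by_char; infer_instance

-- ===== CLAIM (what is proved, stated in full; the proofs are below) =====
def Claim_equal_split_by_char : Prop := ∀ (lst : List String), Dom_split_by_char lst → Spec_split_by_char lst (split_by_char lst)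

-- ===== LEMMAS AND PROOFS =====

-- the unguarded grouping step B's characterisation works with
def modStep (d : PySem.Dict String (List String)) (e : String) : PySem.Dict String (List String) :=
  d.modify (altKey e) [] (fun v => v ++ [e])

-- A's guarded fold over lst equals the unguarded fold over the non-empty words
theorem foldA_eq_foldl_modStep (lst : List String) (d : PySem.Dict String (List String)) :
    lst.foldl (fun result element =>
      match element.toList with
      | [] => result
      | c :: _ =>
        let first_char := String.ofList [PySem.Chars.lowerChar c]
        if result.contains first_char then
          result.modify first_char [] (fun v => v ++ [element])
        else
          result.insert first_char [element]) d
    = (lst.filter (fun e => !e.toList.isEmpty)).foldl modStep d := by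
  induction lst generalizing d with
  | nil => rfl
  | cons e rest ih =>
    rcases h : e.toList with _ | ⟨c, tl⟩
    · simp [List.foldl_cons, h, ih]
    · have hkey : altKey e = String.ofList [PySem.Chars.lowerChar c] := by
        simp [altKey, h]
      have hstep :
          (if d.contains (String.ofList [PySem.Chars.lowerChar c]) then
            d.modify (String.ofList [PySem.Chars.lowerChar c]) [] (fun v => v ++ [e])
          else
            d.insert (String.ofList [PySem.Chars.lowerChar c]) [e]) = modStep d e := by
        by_cases hc : d.contains (String.ofList [PySem.Chars.lowerChar c]) = true
        · simp [hc, modStep, hkey]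
        · have hc' : d.contains (String.ofList [PySem.Chars.lowerChar c]) = false := by
            simpa using hc
          simp [hc', modStep, hkey, PySem.Dict.modify,
            PySem.Dict.getD_of_not_contains d _ hc']
      simp only [List.foldl_cons, h, List.filter_cons]
      rw [hstep, ih]
      simp

-- the value stored under a key by the unguarded fold is the filter of the words
theorem getD_fold_modStep (words : List String) (k : String) :
    ((words.foldl modStep PySem.Dict.empty).getD k []) =
      words.filter (fun w => altKey w == k) := by
  have hmap :
      words.foldl modStep PySem.Dict.empty
        = (words.map (fun e => (altKey e, e))).foldl
            (fun d p => d.modify p.1 [] (fun v => v ++ [p.2])) PySem.Dict.empty := by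
    rw [List.foldl_map]
    rfl
  rw [hmap, PySem.Dict.getD_foldl_modify_append]
  rw [List.filter_map]
  simp [Function.comp_def]

theorem split_by_char_spec : Claim_equal_split_by_char := by
  intro lst _
  show split_by_char lst = split_by_char_alt lst
  unfold split_by_char split_by_char_alt
  rw [foldA_eq_foldl_modStep]
  set words := lst.filter (fun e => !e.toList.isEmpty) with hw
  have hnodup : (words.foldl modStep PySem.Dict.empty).keys.Nodup := by
    have := PySem.Dict.nodup_keys_foldl_modify_key words altKey []
      (fun _ e v => v ++ [e]) (PySem.Dict.empty : PySem.Dict String (List String))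
      (by simp)
    simpa [modStep] using this
  have hkeys : (words.foldl modStep PySem.Dict.empty).keys
      = PySem.List.dedup (words.map altKey) := by
    have := PySem.Dict.keys_foldl_modify_key words altKey []
      (fun _ e v => v ++ [e]) (PySem.Dict.empty : PySem.Dict String (List String))
    rw [PySem.List.dedup_eq_ofList]
    simpa [modStep, PySem.Set.ofList, PySem.Set.update, PySem.Dict.keys_empty] using this
  rw [PySem.Dict.items_eq_map_keys _ hnodup ([] : List String), hkeys]
  exact List.map_congr_left (fun k _ => by rw [getD_fold_modStep])
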